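-- pv_equiv track=rewrite | github.com/Crone1/College-Python | Year One - Semester Two/Week One/password_012.py | each_character
-- ===== SOURCE A (Python) =====
-- def each_character(x):
-- 	a = {}
-- 	for c in x:
-- 		number_of_types = 0
--
-- 		if c.isdigit():
-- 			a['digit'] = 'here'
-- 		elif c.isalpha():
-- 			if c.isupper():
-- 				a['uppercase'] = 'here'
-- 			elif c.islower():
-- 				a['lowercase'] = 'here'
-- 		else:
-- 			a['symbol'] = 'here'
--
-- 	for key in a:
-- 		if a[key] == 'here':
-- 			number_of_types += 1
--
-- 	return number_of_types
-- ===== SOURCE B (Python) =====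
-- def each_character(x):
-- 	return (any(c.isdigit() for c in x)
-- 		+ any(c.isalpha() and c.isupper() for c in x)
-- 		+ any(c.isalpha() and c.islower() for c in x)
-- 		+ any(not c.isdigit() and not c.isalpha() for c in x))
-- ===== Notes on version B (the rewrite author's own statement) =====
-- stated objective: idiomatic
-- what changed: B replaces A's dict-building pass plus key-counting pass by four independent short-circuiting any() scans, one per character category, summing the four booleans; no dict is maintained.
import Mathlib
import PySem

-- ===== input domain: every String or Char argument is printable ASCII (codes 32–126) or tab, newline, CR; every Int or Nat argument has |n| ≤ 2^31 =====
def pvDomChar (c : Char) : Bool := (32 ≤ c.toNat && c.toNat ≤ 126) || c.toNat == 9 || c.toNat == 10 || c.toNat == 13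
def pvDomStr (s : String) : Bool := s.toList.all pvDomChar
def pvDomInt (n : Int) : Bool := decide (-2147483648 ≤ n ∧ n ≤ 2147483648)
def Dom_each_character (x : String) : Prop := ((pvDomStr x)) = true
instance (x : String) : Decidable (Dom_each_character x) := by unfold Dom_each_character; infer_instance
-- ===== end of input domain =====

-- B counts the four character categories with four independent any() scans and sums the
-- booleans, instead of A's dict-building pass followed by a key-counting pass (objective:
-- idiomatic; A raises UnboundLocalError on the empty string, which Pre_ excludes).

-- ===== PORT A =====
def eachStep (a : PySem.Dict String String) (c : Char) : PySem.Dict String String :=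
  if PySem.Chars.isdigit c then a.insert "digit" "here"
  else if PySem.Chars.isalpha c then
    (if PySem.Chars.isupper c then a.insert "uppercase" "here"
     else if PySem.Chars.islower c then a.insert "lowercase" "here"
     else a)
  else a.insert "symbol" "here"

def each_character (x : String) : Int :=
  let a := x.toList.foldl eachStep PySem.Dict.empty
  a.keys.foldl (fun n k => if a.getD k "" == "here" then n + 1 else n) 0

-- ===== PORT B =====
def pyBoolInt (b : Bool) : Int := if b then 1 else 0

def each_character_alt (x : String) : Int :=
  pyBoolInt (x.toList.any (fun c => PySem.Chars.isdigit c))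
  + pyBoolInt (x.toList.any (fun c => PySem.Chars.isalpha c && PySem.Chars.isupper c))
  + pyBoolInt (x.toList.any (fun c => PySem.Chars.isalpha c && PySem.Chars.islower c))
  + pyBoolInt (x.toList.any (fun c => !PySem.Chars.isdigit c && !PySem.Chars.isalpha c))

-- ===== PRECONDITION & SPEC =====
-- Pre_ excludes only the empty string, on which Python A raises UnboundLocalError
-- (number_of_types is never assigned when the loop body does not run).
def Pre_each_character (x : String) : Prop := x ≠ ""
instance (x : String) : Decidable (Pre_each_character x) := by unfold Pre_each_character; infer_instance
def pvWitness_each_character : String := "aB3!"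

def Spec_each_character (x : String) (out : Int) : Prop := out = each_character_alt x
instance (x : String) (out : Int) : Decidable (Spec_each_character x out) := by unfold Spec_each_character; infer_instance

-- ===== CLAIM (what is proved, stated in full; the proofs are below) =====
def Claim_equal_each_character : Prop := ∀ (x : String), Dom_each_character x → Pre_each_character x → Spec_each_character x (each_character x)

-- ===== LEMMAS AND PROOFS =====

-- the category key A's loop body assigns for character c (none = no assignment)
def catKey (c : Char) : Option String :=
  if PySem.Chars.isdigit c then some "digit"
  else if PySem.Chars.isalpha c then
    (if PySem.Chars.isupper c then some "uppercase"
     else if PySem.Chars.islower c then some "lowercase"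
     else none)
  else some "symbol"

theorem eachStep_eq (a : PySem.Dict String String) (c : Char) :
    eachStep a c = (catKey c).elim a (fun k => a.insert k "here") := by
  unfold eachStep catKey; split_ifs <;> rfl

theorem digit_not_upper (c : Char) (h : PySem.Chars.isdigit c = true) :
    PySem.Chars.isupper c = false := by
  revert h
  simp [PySem.Chars.isdigit, PySem.Chars.isupper, Char.le_def, UInt32.le_iff_toNat_le]
  omega

theorem digit_not_lower (c : Char) (h : PySem.Chars.isdigit c = true) :
    PySem.Chars.islower c = false := by
  revert h
  simp [PySem.Chars.isdigit, PySem.Chars.islower, Char.le_def, UInt32.le_iff_toNat_le]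
  omega

theorem upper_not_lower (c : Char) (h : PySem.Chars.isupper c = true) :
    PySem.Chars.islower c = false := by
  revert h
  simp [PySem.Chars.isupper, PySem.Chars.islower, Char.le_def, UInt32.le_iff_toNat_le]
  omega

theorem catKey_digit (c : Char) :
    (catKey c == some "digit") = PySem.Chars.isdigit c := by
  unfold catKey; split_ifs <;> simp_all

theorem catKey_upper (c : Char) :
    (catKey c == some "uppercase") = (PySem.Chars.isalpha c && PySem.Chars.isupper c) := by
  unfold catKey
  split_ifs with h1 h2 h3 h4
  · simp [PySem.Chars.isalpha, digit_not_upper c h1, digit_not_lower c h1]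
  · simp [h2, h3]
  · simp [h3]
  · simp [h3]
  · simp_all [PySem.Chars.isalpha]

theorem catKey_lower (c : Char) :
    (catKey c == some "lowercase") = (PySem.Chars.isalpha c && PySem.Chars.islower c) := by
  unfold catKey
  split_ifs with h1 h2 h3 h4
  · simp [PySem.Chars.isalpha, digit_not_upper c h1, digit_not_lower c h1]
  · simp [upper_not_lower c h3]
  · simp [h2, h4]
  · simp_all [PySem.Chars.isalpha]
  · simp_all [PySem.Chars.isalpha]

theorem catKey_symbol (c : Char) :
    (catKey c == some "symbol") = (!PySem.Chars.isdigit c && !PySem.Chars.isalpha c) := by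
  unfold catKey; split_ifs <;> simp_all

theorem catKey_mem (c : Char) (k : String) (h : (catKey c == some k) = true) :
    k ∈ ["digit", "uppercase", "lowercase", "symbol"] := by
  unfold catKey at h; split_ifs at h <;> simp_all

theorem contains_build (l : List Char) (d : PySem.Dict String String) (k : String) :
    (l.foldl eachStep d).contains k = (d.contains k || l.any (fun c => catKey c == some k)) := by
  induction l generalizing d with
  | nil => simp
  | cons c l ih =>
    simp only [List.foldl_cons, List.any_cons, eachStep_eq]
    cases hc : catKey c with
    | none => simp [ih]
    | some k' =>
      simp [ih, PySem.Dict.contains_insert]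
      by_cases hk : k = k' <;> simp [hk, BEq.symm_false]

theorem nodup_build (l : List Char) (d : PySem.Dict String String) (h : d.keys.Nodup) :
    (l.foldl eachStep d).keys.Nodup := by
  induction l generalizing d with
  | nil => exact h
  | cons c l ih =>
    simp only [List.foldl_cons, eachStep_eq]
    cases hc : catKey c with
    | none => exact ih d h
    | some k' => exact ih _ (PySem.Dict.nodup_keys_insert _ _ _ h)

theorem values_build (l : List Char) (d : PySem.Dict String String)
    (h : ∀ v ∈ d.values, v = "here") : ∀ v ∈ (l.foldl eachStep d).values, v = "here" := by
  induction l generalizing d with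
  | nil => exact h
  | cons c l ih =>
    simp only [List.foldl_cons, eachStep_eq]
    cases hc : catKey c with
    | none => exact ih d h
    | some k' =>
      refine ih _ (fun v hv => ?_)
      rcases PySem.Dict.mem_values_insert _ _ _ _ hv with h1 | h1
      · exact h1
      · exact h v h1

theorem foldl_count_all (ks : List String) (P : String → Bool) (n : Int)
    (h : ∀ k ∈ ks, P k = true) :
    ks.foldl (fun n k => if P k then n + 1 else n) n = n + ks.length := by
  induction ks generalizing n with
  | nil => simp
  | cons k ks ih =>
    simp only [List.foldl_cons, h k (by simp), if_true, List.length_cons]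
    rw [ih _ (fun k hk => h k (by simp [hk]))]
    push_cast; ring

theorem each_character_eq (x : String) : each_character x = each_character_alt x := by
  simp only [each_character, each_character_alt]
  set l := x.toList with hl
  set a := l.foldl eachStep PySem.Dict.empty with ha
  have hnd : a.keys.Nodup := nodup_build l _ (by simp)
  have hval : ∀ k ∈ a.keys, (a.getD k "" == "here") = true := by
    intro k hk
    have hc : a.contains k = true := (PySem.Dict.contains_iff_mem_keys a k).mpr hk
    rw [PySem.Dict.contains_eq_isSome_get?] at hc
    obtain ⟨v, hv⟩ := Option.isSome_iff_exists.mp hc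
    have hit := PySem.Dict.mem_items_of_get?_eq_some a hv
    have hvv : v = "here" := values_build l PySem.Dict.empty
      (by intro v hv; simp [PySem.Dict.empty, PySem.Dict.values] at hv) v
      (by simpa [PySem.Dict.values] using List.mem_map_of_mem (f := Prod.snd) hit)
    rw [PySem.Dict.getD_eq_get?_getD, hv, hvv]
    rfl
  simp only [foldl_count_all a.keys _ 0 hval]
  have hmem : ∀ k, k ∈ a.keys ↔ l.any (fun c => catKey c == some k) = true := by
    intro k
    rw [← PySem.Dict.contains_iff_mem_keys, ha, contains_build]
    simp
  have hsub : ∀ k ∈ a.keys, k ∈ ["digit", "uppercase", "lowercase", "symbol"] := by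
    intro k hk
    obtain ⟨c, _, hc⟩ := List.any_eq_true.mp ((hmem k).1 hk)
    exact catKey_mem c k hc
  have hperm : a.keys.Perm (["digit", "uppercase", "lowercase", "symbol"].filter (· ∈ a.keys)) := by
    rw [List.perm_ext_iff_of_nodup hnd (List.Nodup.filter _ (by decide))]
    intro k
    simp only [List.mem_filter, decide_eq_true_eq]
    exact ⟨fun h => ⟨hsub k h, h⟩, fun h => h.2⟩
  rw [hperm.length_eq]
  have e1 := hmem "digit"; have e2 := hmem "uppercase"
  have e3 := hmem "lowercase"; have e4 := hmem "symbol"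
  simp only [catKey_digit] at e1
  simp only [catKey_upper] at e2
  simp only [catKey_lower] at e3
  simp only [catKey_symbol] at e4
  clear hval hsub hperm hmem hnd ha hl
  simp only [pyBoolInt, List.filter_cons, List.filter_nil]
  by_cases h1 : (l.any fun c => PySem.Chars.isdigit c) = true <;>
    by_cases h2 : (l.any fun c => PySem.Chars.isalpha c && PySem.Chars.isupper c) = true <;>
      by_cases h3 : (l.any fun c => PySem.Chars.isalpha c && PySem.Chars.islower c) = true <;>
        by_cases h4 : (l.any fun c => !PySem.Chars.isdigit c && !PySem.Chars.isalpha c) = true <;>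
          simp [e1, e2, e3, e4, h1, h2, h3, h4]

-- ===== VERDICT (by name: the statement is the Claim_ definition above) =====
theorem each_character_spec : Claim_equal_each_character := by
  intro x _ _
  unfold Spec_each_character
  exact each_character_eq x
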